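-- pv_equiv track=rewrite | github.com/PeachDew/PairProgramming | qn11.py | firstrepeat
-- ===== SOURCE A (Python) =====
-- def firstrepeat(array):
--     count = 0
--     while count < len(array) - 1:
--         pivot = array[count]
--         for i in range(count+1,len(array)):
--             if array[i] == pivot:
--                 return i
--         count += 1
-- ===== SOURCE B (Python) =====
-- def firstrepeat(array):
--     # One backward pass computing, for each position, the index of the next
--     # later occurrence of the same value; then return the first non-None entry.
--     nxt = {}                        # value -> smallest later index seen so far
--     nexts = [None] * len(array)
--     for i in range(len(array) - 1, -1, -1):
--         nexts[i] = nxt.get(array[i])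
--         nxt[array[i]] = i
--     for n in nexts:
--         if n is not None:
--             return n
--     return None
-- ===== Notes on version B (the rewrite author's own statement) =====
-- stated objective: alternative
-- what changed: Replaced the nested rescan (for each pivot, scan the whole tail for a duplicate) by one backward pass that records each value's next-occurrence index in a dict, followed by a single forward scan for the first position with a later duplicate.
import Mathlib
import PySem

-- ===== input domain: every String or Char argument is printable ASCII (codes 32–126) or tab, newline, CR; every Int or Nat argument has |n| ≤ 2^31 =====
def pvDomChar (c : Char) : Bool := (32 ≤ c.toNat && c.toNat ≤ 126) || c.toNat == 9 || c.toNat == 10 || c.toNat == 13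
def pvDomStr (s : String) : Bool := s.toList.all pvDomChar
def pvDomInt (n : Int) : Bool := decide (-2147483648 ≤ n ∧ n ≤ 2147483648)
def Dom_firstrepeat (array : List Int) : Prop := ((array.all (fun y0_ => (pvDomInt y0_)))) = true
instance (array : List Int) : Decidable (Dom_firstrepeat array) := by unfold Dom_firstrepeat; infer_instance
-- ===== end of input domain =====

-- B replaces A's nested rescanning with one backward pass recording each value's next
-- occurrence in a dict, then a single forward scan (objective: alternative).

-- ===== PORT A =====
-- inner 'for i in range(count+1, len(array)): if array[i] == pivot: return i'
-- (early-return for-loop = structural recursion over the range list; array[i] is in range there)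
def frInner (array : List Int) (pivot : Int) : List Int → Option Int
  | [] => none
  | i :: is =>
    if PySem.List.pyGetD array i 0 = pivot then some i
    else frInner array pivot is

-- outer 'while count < len(array) - 1'; fuel = len(array) bounds the loop (count grows by 1 each pass)
def frOuter (array : List Int) : Nat → Int → Option Int
  | 0, _ => none
  | fuel + 1, count =>
    if count < PySem.List.len array - 1 then
      match frInner array (PySem.List.pyGetD array count 0)
          (PySem.List.pyRange (count + 1) (PySem.List.len array) 1) with
      | some i => some i
      | none => frOuter array fuel (count + 1)
    else none

def firstrepeat (array : List Int) : Option Int := frOuter array array.length 0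

-- ===== PORT B =====
-- the backward loop 'for i in range(len(array)-1, -1, -1)': process the tail first,
-- then record nexts[i] = nxt.get(array[i]) and set nxt[array[i]] = i
def frBuild (i : Int) : List Int → PySem.Dict Int Int × List (Option Int)
  | [] => (PySem.Dict.empty, [])
  | x :: rest =>
    let (nxt, ns) := frBuild (i + 1) rest
    (nxt.insert x i, nxt.get? x :: ns)

-- 'for n in nexts: if n is not None: return n' = first non-None element
def firstrepeat_alt (array : List Int) : Option Int :=
  ((frBuild 0 array).2).findSome? id

-- ===== PRECONDITION & SPEC =====
def Spec_firstrepeat (array : List Int) (out : Option Int) : Prop := out = firstrepeat_alt array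
instance (array : List Int) (out : Option Int) : Decidable (Spec_firstrepeat array out) := by unfold Spec_firstrepeat; infer_instance

-- ===== CLAIM (what is proved, stated in full; the proofs are below) =====
def Claim_equal_firstrepeat : Prop := ∀ (array : List Int), Dom_firstrepeat array → Spec_firstrepeat array (firstrepeat array)

-- ===== LEMMAS AND PROOFS =====

-- reference: absolute index (starting at i) of the first element equal to pivot
def refInner (pivot : Int) (i : Int) : List Int → Option Int
  | [] => none
  | x :: rest => if x = pivot then some i else refInner pivot (i + 1) rest

theorem frBuild_fst_get? (l : List Int) (i : Int) (x : Int) :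
    ((frBuild i l).1).get? x = refInner x i l := by
  induction l generalizing i with
  | nil => simp [frBuild, refInner, PySem.Dict.get?_empty]
  | cons y rest ih =>
    simp only [frBuild, refInner]
    rw [PySem.Dict.get?_insert]
    by_cases h : x = y
    · subst h; simp
    · simp [h, Ne.symm h, ih]

theorem frBuild_snd_cons (x : Int) (rest : List Int) (i : Int) :
    (frBuild i (x :: rest)).2 = refInner x (i + 1) rest :: (frBuild (i + 1) rest).2 := by
  simp [frBuild, frBuild_fst_get?]

theorem frInner_eq (array : List Int) (pivot : Int) (j : Nat) :
    frInner array pivot (PySem.List.pyRange (j : Int) (PySem.List.len array) 1)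
      = refInner pivot (j : Int) (array.drop j) := by
  by_cases h : j < array.length
  · rw [PySem.List.pyRange_one_cons (by simp [PySem.List.len_eq]; omega)]
    rw [List.drop_eq_getElem_cons h]
    simp only [frInner, refInner]
    rw [PySem.List.pyGetD_natCast]
    rw [List.getD_eq_getElem _ _ h]
    by_cases he : array[j] = pivot
    · simp [he]
    · simp only [he, if_false]
      have hc : ((j : Int) + 1) = ((j + 1 : Nat) : Int) := by push_cast; ring
      rw [hc, frInner_eq array pivot (j + 1)]
  · have hz : PySem.List.pyRange (j : Int) (PySem.List.len array) 1 = [] := by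
      apply List.eq_nil_of_length_eq_zero
      rw [PySem.List.length_pyRange_one]
      simp [PySem.List.len_eq]; omega
    rw [hz, List.drop_eq_nil_of_le (by omega)]
    rfl
termination_by array.length - j

theorem frOuter_eq (array : List Int) (fuel : Nat) (count : Nat)
    (hf : array.length ≤ fuel + count) :
    frOuter array fuel (count : Int)
      = ((frBuild (count : Int) (array.drop count)).2).findSome? id := by
  induction fuel generalizing count with
  | zero =>
    have hd : array.drop count = [] := List.drop_eq_nil_of_le (by omega)
    simp [frOuter, hd, frBuild]
  | succ fuel ih =>
    by_cases h : count < array.length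
    · rw [List.drop_eq_getElem_cons h, frBuild_snd_cons, List.findSome?_cons]
      simp only [frOuter]
      by_cases h2 : (count : Int) < PySem.List.len array - 1
      · have h2' : count + 1 < array.length := by
          rw [PySem.List.len_eq] at h2; omega
        simp only [h2, if_true]
        rw [PySem.List.pyGetD_natCast, List.getD_eq_getElem _ _ h]
        have hc : ((count : Int) + 1) = ((count + 1 : Nat) : Int) := by push_cast; ring
        rw [hc, frInner_eq]
        cases hr : refInner array[count] ((count + 1 : Nat) : Int) (array.drop (count + 1)) with
        | some v => simp
        | none =>
          simp only [id]
          rw [ih (count + 1) (by omega)]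
      · -- count + 1 = array.length: the dropped tail is empty, both sides are none
        have hlen : count + 1 = array.length := by
          rw [PySem.List.len_eq] at h2; omega
        have hd : array.drop (count + 1) = [] := List.drop_eq_nil_of_le (by omega)
        simp only [h2, if_false, hd, refInner, frBuild, List.findSome?]
        rfl
    · have h2 : ¬ (count : Int) < PySem.List.len array - 1 := by
        rw [PySem.List.len_eq]; omega
      simp only [frOuter]
      rw [if_neg h2, List.drop_eq_nil_of_le (show array.length ≤ count by omega)]
      simp [frBuild]

-- ===== VERDICT (by name: the statement is the Claim_ definition above) =====
theorem firstrepeat_spec : Claim_equal_firstrepeat := by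
  intro array _
  show firstrepeat array = firstrepeat_alt array
  rw [firstrepeat, firstrepeat_alt]
  have := frOuter_eq array array.length 0 (by omega)
  simpa using this
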